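-- pv_equiv track=rewrite | github.com/redmage123/artemis | src/java_web_framework_detector.py | _detect_database_technologies
-- ===== SOURCE A (Python) =====
-- from typing import Dict, List, Optional, Set
--
-- def _detect_database_technologies(dependencies: Dict[str, str]) -> List[str]:
--     """Detect database access technologies"""
--     techs = []
--
--     if any("spring-data-jpa" in dep or "jakarta.persistence-api" in dep for dep in dependencies):
--         techs.append("JPA")
--     if any("hibernate" in dep for dep in dependencies):
--         techs.append("Hibernate")
--     if any("mybatis" in dep for dep in dependencies):
--         techs.append("MyBatis")
--     if any("jooq" in dep for dep in dependencies):
--         techs.append("jOOQ")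
--     if any("jdbc" in dep for dep in dependencies):
--         techs.append("JDBC")
--     if any("spring-data-mongodb" in dep for dep in dependencies):
--         techs.append("Spring Data MongoDB")
--     if any("spring-data-redis" in dep for dep in dependencies):
--         techs.append("Spring Data Redis")
--
--     return techs
-- ===== SOURCE B (Python) =====
-- _TRIGGERS = [
--     ("spring-data-jpa", "JPA"),
--     ("jakarta.persistence-api", "JPA"),
--     ("hibernate", "Hibernate"),
--     ("mybatis", "MyBatis"),
--     ("jooq", "jOOQ"),
--     ("jdbc", "JDBC"),
--     ("spring-data-mongodb", "Spring Data MongoDB"),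
--     ("spring-data-redis", "Spring Data Redis"),
-- ]
--
-- _ORDER = ["JPA", "Hibernate", "MyBatis", "jOOQ", "JDBC",
--           "Spring Data MongoDB", "Spring Data Redis"]
--
--
-- def _detect_database_technologies(dependencies):
--     """Detect database access technologies (single pass over dependencies)."""
--     found = set()
--     for dep in dependencies:
--         for sub, name in _TRIGGERS:
--             if sub in dep:
--                 found.add(name)
--     return [name for name in _ORDER if name in found]
-- ===== Notes on version B (the rewrite author's own statement) =====
-- stated objective: alternative
-- what changed: Replaces seven separate any()-scans over the dependency keys by a single accumulating pass that matches each key against a trigger table into a found-set, followed by a fixed ordered emission pass.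
import Mathlib
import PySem

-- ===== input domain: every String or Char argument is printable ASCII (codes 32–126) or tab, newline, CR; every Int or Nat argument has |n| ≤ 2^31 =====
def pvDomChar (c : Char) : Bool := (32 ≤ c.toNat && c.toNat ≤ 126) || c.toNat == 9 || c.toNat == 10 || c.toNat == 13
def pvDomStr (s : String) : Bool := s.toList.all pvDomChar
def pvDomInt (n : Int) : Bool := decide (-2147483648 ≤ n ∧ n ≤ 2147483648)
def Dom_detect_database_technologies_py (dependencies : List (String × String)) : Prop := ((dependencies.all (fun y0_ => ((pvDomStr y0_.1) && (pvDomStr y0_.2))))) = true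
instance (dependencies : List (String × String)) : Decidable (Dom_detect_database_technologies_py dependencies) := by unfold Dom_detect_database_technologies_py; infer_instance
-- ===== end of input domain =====

-- B replaces A's seven separate any()-scans of the dependency keys by one accumulating
-- pass into a found-set followed by a fixed ordered emission pass (alternative decomposition).

-- ===== PORT A =====
-- 'for dep in dependencies' iterates the dict's KEYS, i.e. the first components.
def detect_database_technologies_py (dependencies : List (String × String)) : List String :=
  let techs : List String := []
  let techs := if dependencies.any (fun dep => PySem.Str.isIn "spring-data-jpa" dep.1 || PySem.Str.isIn "jakarta.persistence-api" dep.1) then techs ++ ["JPA"] else techs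
  let techs := if dependencies.any (fun dep => PySem.Str.isIn "hibernate" dep.1) then techs ++ ["Hibernate"] else techs
  let techs := if dependencies.any (fun dep => PySem.Str.isIn "mybatis" dep.1) then techs ++ ["MyBatis"] else techs
  let techs := if dependencies.any (fun dep => PySem.Str.isIn "jooq" dep.1) then techs ++ ["jOOQ"] else techs
  let techs := if dependencies.any (fun dep => PySem.Str.isIn "jdbc" dep.1) then techs ++ ["JDBC"] else techs
  let techs := if dependencies.any (fun dep => PySem.Str.isIn "spring-data-mongodb" dep.1) then techs ++ ["Spring Data MongoDB"] else techs
  let techs := if dependencies.any (fun dep => PySem.Str.isIn "spring-data-redis" dep.1) then techs ++ ["Spring Data Redis"] else techs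
  techs

-- ===== PORT B =====
def dbTriggers : List (String × String) :=
  [("spring-data-jpa", "JPA"), ("jakarta.persistence-api", "JPA"),
   ("hibernate", "Hibernate"), ("mybatis", "MyBatis"), ("jooq", "jOOQ"),
   ("jdbc", "JDBC"), ("spring-data-mongodb", "Spring Data MongoDB"),
   ("spring-data-redis", "Spring Data Redis")]

def dbOrder : List String :=
  ["JPA", "Hibernate", "MyBatis", "jOOQ", "JDBC", "Spring Data MongoDB", "Spring Data Redis"]

def detect_database_technologies_py_alt (dependencies : List (String × String)) : List String :=
  let found : PySem.Set String :=
    dependencies.foldl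
      (fun found dep =>
        dbTriggers.foldl
          (fun found t => if PySem.Str.isIn t.1 dep.1 then PySem.Set.add found t.2 else found)
          found)
      PySem.Set.empty
  dbOrder.foldl (fun out name => if PySem.Set.contains found name then out ++ [name] else out) []

-- ===== PRECONDITION & SPEC =====
def Spec_detect_database_technologies_py (dependencies : List (String × String)) (out : List String) : Prop := out = detect_database_technologies_py_alt dependencies
instance (dependencies : List (String × String)) (out : List String) : Decidable (Spec_detect_database_technologies_py dependencies out) := by unfold Spec_detect_database_technologies_py; infer_instance

-- ===== CLAIM (what is proved, stated in full; the proofs are below) =====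
def Claim_equal_detect_database_technologies_py : Prop := ∀ (dependencies : List (String × String)), Dom_detect_database_technologies_py dependencies → Spec_detect_database_technologies_py dependencies (detect_database_technologies_py dependencies)

-- ===== LEMMAS AND PROOFS =====

theorem contains_add_eq (s : PySem.Set String) (y m : String) :
    (PySem.Set.add s y).contains m = (s.contains m || m == y) := by
  simp only [PySem.Set.add]
  by_cases h : PySem.Set.contains s y = true
  · rw [if_pos h]
    by_cases hm : m = y
    · subst hm
      have : m ∈ s := by simpa [PySem.Set.contains_eq_listContains] using h
      simp [this]
    · simp [hm]
  · rw [if_neg h]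
    by_cases hm : m = y
    · subst hm; simp [PySem.Set.contains_eq_listContains]
    · simp [PySem.Set.contains_eq_listContains, hm]

theorem contains_inner (ts : List (String × String)) (d : String × String)
    (s : PySem.Set String) (m : String) :
    (ts.foldl (fun s t => if PySem.Str.isIn t.1 d.1 then PySem.Set.add s t.2 else s) s).contains m
      = (s.contains m || ts.any (fun t => PySem.Str.isIn t.1 d.1 && t.2 == m)) := by
  induction ts generalizing s with
  | nil => simp
  | cons t ts ih =>
    simp only [List.foldl_cons, List.any_cons]
    by_cases h : PySem.Str.isIn t.1 d.1 = true
    · rw [if_pos h, ih, contains_add_eq, h]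
      by_cases hm : m = t.2
      · subst hm; simp
      · have h1 : (m == t.2) = false := by simpa using hm
        have h2 : (t.2 == m) = false := by simpa using (Ne.symm hm)
        simp [h1, h2, Bool.or_assoc]
    · have hf : PySem.Str.isIn t.1 d.1 = false := by simpa using h
      rw [if_neg h, ih, hf]
      simp [Bool.or_assoc]

theorem contains_outer (deps : List (String × String)) (s : PySem.Set String) (m : String) :
    (deps.foldl
        (fun found dep =>
          dbTriggers.foldl
            (fun found t => if PySem.Str.isIn t.1 dep.1 then PySem.Set.add found t.2 else found)
            found)
        s).contains m
      = (s.contains m ||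
          deps.any (fun dep => dbTriggers.any (fun t => PySem.Str.isIn t.1 dep.1 && t.2 == m))) := by
  induction deps generalizing s with
  | nil => simp
  | cons d deps ih =>
    simp only [List.foldl_cons, List.any_cons, ih, contains_inner, Bool.or_assoc]

-- ===== VERDICT (by name: the statement is the Claim_ definition above) =====
theorem detect_database_technologies_py_spec : Claim_equal_detect_database_technologies_py := by
  intro deps _
  show detect_database_technologies_py deps = detect_database_technologies_py_alt deps
  simp only [detect_database_technologies_py_alt, dbOrder, List.foldl_cons, List.foldl_nil]
  simp only [contains_outer]
  simp only [detect_database_technologies_py, dbTriggers, List.any_cons, List.any_nil,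
    String.reduceBEq, beq_self_eq_true, Bool.and_true, Bool.and_false, Bool.or_false,
    Bool.false_or, PySem.Set.contains_eq_listContains, PySem.Set.empty,
    List.contains_nil]
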